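-- pv_equiv track=rewrite | github.com/HooFaya/hiFly | 剑指第二轮重刷/43数字在排序数组中出现的次数.py | get_last
-- ===== SOURCE A (Python) =====
-- def get_last(data,k):
--     l=0
--     r=len(data)-1
--     while(l<=r):
--         m=l+(r-l)//2
--         if k<data[m]:
--             r=m-1
--         elif data[m]<k:
--             l=m+1
--         else:
--             while(m+1<len(data) and data[m+1]==data[m]):
--                 m+=1
--             return m
--     return -1
-- ===== SOURCE B (Python) =====
-- def get_last(data, k):
--     lo, hi, ans = 0, len(data) - 1, -1
--     while lo <= hi:
--         m = (lo + hi) // 2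
--         if data[m] <= k:
--             if data[m] == k:
--                 ans = m
--             lo = m + 1
--         else:
--             hi = m - 1
--     return ans
-- ===== Notes on version B (the rewrite author's own statement) =====
-- stated objective: alternative
-- what changed: Replaced A's find-any-occurrence binary search followed by a linear rightward scan over the equal run with a single right-biased binary search that keeps the last matching index in an accumulator, so no post-search scan is needed.
-- outside the precondition, e.g. on get_last([0, 1, 0, 1], 1): A returns 1, B returns 3
import Mathlib
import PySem

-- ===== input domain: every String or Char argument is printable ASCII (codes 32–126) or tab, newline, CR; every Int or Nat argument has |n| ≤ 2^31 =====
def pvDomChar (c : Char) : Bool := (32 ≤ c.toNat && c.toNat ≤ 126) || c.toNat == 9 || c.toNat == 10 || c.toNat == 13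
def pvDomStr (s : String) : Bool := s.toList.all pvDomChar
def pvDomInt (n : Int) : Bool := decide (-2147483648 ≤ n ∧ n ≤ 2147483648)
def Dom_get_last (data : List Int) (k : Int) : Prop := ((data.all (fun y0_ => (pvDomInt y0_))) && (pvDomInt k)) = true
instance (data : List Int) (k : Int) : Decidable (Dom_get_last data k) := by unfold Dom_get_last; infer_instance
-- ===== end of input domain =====

-- B replaces A's find-any-occurrence binary search + linear rightward scan over the equal run
-- by a single right-biased binary search carrying the last matching index (objective: alternative,
-- no post-search scan; same measured cost).

-- ===== PORT A =====
-- inner `while(m+1<len(data) and data[m+1]==data[m]): m+=1` then `return m`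
def get_last_scan (data : List Int) (m : Int) : Int :=
  if m + 1 < (data.length : Int) ∧
      PySem.List.pyGet? data (m + 1) = PySem.List.pyGet? data m then
    get_last_scan data (m + 1)
  else m
termination_by ((data.length : Int) - m).toNat
decreasing_by omega

-- outer `while(l<=r)` loop; indices reached are always in range, `.getD 0` is never the
-- IndexError case (proved by the invariants below), so the port is exact
def get_last_loop (data : List Int) (k l r : Int) : Int :=
  if h : l ≤ r then
    let m := l + PySem.Int.floordiv (r - l) 2
    let dm := (PySem.List.pyGet? data m).getD 0
    if k < dm then get_last_loop data k l (m - 1)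
    else if dm < k then get_last_loop data k (m + 1) r
    else get_last_scan data m
  else -1
termination_by (r + 1 - l).toNat
decreasing_by
  all_goals
    have hf := PySem.Int.floordiv_eq_ediv_of_pos (a := r - l) (b := 2) (by omega)
    simp only [hf] at *
    omega

def get_last (data : List Int) (k : Int) : Int :=
  get_last_loop data k 0 ((data.length : Int) - 1)

-- ===== PORT B =====
-- right-biased binary search; `ans` holds the last index seen equal to k
def get_last_alt_loop (data : List Int) (k lo hi ans : Int) : Int :=
  if h : lo ≤ hi then
    let m := PySem.Int.floordiv (lo + hi) 2
    let dm := (PySem.List.pyGet? data m).getD 0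
    if dm ≤ k then
      get_last_alt_loop data k (m + 1) hi (if dm = k then m else ans)
    else
      get_last_alt_loop data k lo (m - 1) ans
  else ans
termination_by (hi + 1 - lo).toNat
decreasing_by
  all_goals
    have hf := PySem.Int.floordiv_two_mid_bounds (lo := lo) (hi := hi) h
    omega

def get_last_alt (data : List Int) (k : Int) : Int :=
  get_last_alt_loop data k 0 ((data.length : Int) - 1) (-1)

-- ===== PRECONDITION & SPEC =====
-- Pre_ excludes lists that are unsorted AND contain k: there A still returns, but which
-- occurrence a binary search reports on unsorted input is an artefact of the probe order and
-- neither value is specified (e.g. [0,1,0,1] with k=1: A returns 1, B returns 3); when k is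
-- absent both searches return -1 whatever the order, so those inputs stay inside Pre_.
def Pre_get_last (data : List Int) (k : Int) : Prop :=
  List.Pairwise (· ≤ ·) data ∨ k ∉ data
instance (data : List Int) (k : Int) : Decidable (Pre_get_last data k) := by unfold Pre_get_last; infer_instance

def pvWitness_get_last : List Int × Int := ([1, 2, 2, 3], 2)

def Spec_get_last (data : List Int) (k : Int) (out : Int) : Prop := out = get_last_alt data k
instance (data : List Int) (k : Int) (out : Int) : Decidable (Spec_get_last data k out) := by unfold Spec_get_last; infer_instance

-- ===== CLAIM (what is proved, stated in full; the proofs are below) =====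
def Claim_equal_get_last : Prop := ∀ (data : List Int) (k : Int), Dom_get_last data k → Pre_get_last data k → Spec_get_last data k (get_last data k)

-- ===== LEMMAS AND PROOFS =====

-- number of elements < k resp. ≤ k; for sorted data these delimit the run of copies of k
def cntLT (data : List Int) (k : Int) : Nat := data.countP (fun x => decide (x < k))
def cntLE (data : List Int) (k : Int) : Nat := data.countP (fun x => decide (x ≤ k))

-- on a sorted list, a downward-closed predicate holds exactly on the prefix of length countP
theorem sorted_countP_iff (p : Int → Bool) (hp : ∀ a b : Int, a ≤ b → p b = true → p a = true)
    (data : List Int) (hs : List.Pairwise (· ≤ ·) data) :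
    ∀ i : Nat, (hi : i < data.length) → (p data[i] = true ↔ i < data.countP p) := by
  induction data with
  | nil => intro i hi; simp at hi
  | cons x xs ih =>
    rcases List.pairwise_cons.mp hs with ⟨hx, hxs⟩
    intro i hi
    rcases i with _ | j
    · simp only [List.getElem_cons_zero, List.countP_cons]
      constructor
      · intro hpx; simp [hpx]
      · intro hpos
        by_cases hpx : p x = true
        · exact hpx
        · simp [hpx] at hpos
          rcases hpos with ⟨y, hy, hpy⟩
          exact hp x y (hx y hy) hpy
    · have hj : j < xs.length := by simpa using hi
      simp only [List.getElem_cons_succ, List.countP_cons]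
      by_cases hpx : p x = true
      · simp only [hpx, if_pos]
        rw [ih hxs j hj]
        omega
      · have h0 : xs.countP p = 0 := by
          by_contra hne
          rcases List.countP_pos_iff.mp (Nat.pos_of_ne_zero hne) with ⟨y, hy, hpy⟩
          exact hpx (hp x y (hx y hy) hpy)
        constructor
        · intro hpj
          exact absurd ((ih hxs j hj).mp hpj) (by omega)
        · intro hlt; simp [hpx, h0] at hlt

theorem pyGet_in_range (data : List Int) (m : Int) (h0 : 0 ≤ m) (h1 : m < (data.length : Int)) :
    (PySem.List.pyGet? data m).getD 0 = data[m.toNat]'(by omega) := by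
  rw [PySem.List.pyGet?_eq_some_getElem (xs := data) (i := m) h0 (by exact_mod_cast h1)]
  rfl

-- F1/F2 specialised
theorem lt_iff_cnt (data : List Int) (k : Int) (hs : List.Pairwise (· ≤ ·) data)
    (i : Nat) (hi : i < data.length) : data[i] < k ↔ i < cntLT data k := by
  have := sorted_countP_iff (fun x => decide (x < k))
    (by intro a b hab hb; simp at hb ⊢; omega) data hs i hi
  simpa [cntLT] using this

theorem le_iff_cnt (data : List Int) (k : Int) (hs : List.Pairwise (· ≤ ·) data)
    (i : Nat) (hi : i < data.length) : data[i] ≤ k ↔ i < cntLE data k := by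
  have := sorted_countP_iff (fun x => decide (x ≤ k))
    (by intro a b hab hb; simp at hb ⊢; omega) data hs i hi
  simpa [cntLE] using this

theorem eq_iff_cnt (data : List Int) (k : Int) (hs : List.Pairwise (· ≤ ·) data)
    (i : Nat) (hi : i < data.length) :
    data[i] = k ↔ (cntLT data k ≤ i ∧ i < cntLE data k) := by
  have h1 := lt_iff_cnt data k hs i hi
  have h2 := le_iff_cnt data k hs i hi
  constructor
  · intro he; rw [he] at h1 h2; omega
  · intro ⟨ha, hb⟩
    have := h1.not
    have := h2.mpr hb
    omega

theorem cntLT_le_cntLE (data : List Int) (k : Int) : cntLT data k ≤ cntLE data k := by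
  apply List.countP_mono_left
  intro a _ h; simp at h ⊢; omega

theorem cntLE_le_length (data : List Int) (k : Int) : cntLE data k ≤ data.length :=
  List.countP_le_length

theorem scan_eq (data : List Int) (k : Int) (hs : List.Pairwise (· ≤ ·) data) :
    ∀ N : Nat, ∀ m : Int, ((cntLE data k : Int) - m).toNat ≤ N →
      (cntLT data k : Int) ≤ m → m < (cntLE data k : Int) →
      get_last_scan data m = (cntLE data k : Int) - 1 := by
  intro N
  induction N with
  | zero => intro m hN h1 h2; omega
  | succ N ih =>
    intro m hN h1 h2
    have hLE : (cntLE data k : Int) ≤ (data.length : Int) := by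
      exact_mod_cast cntLE_le_length data k
    have hm0 : 0 ≤ m := le_trans (by positivity) h1
    have hmn : m < (data.length : Int) := by omega
    have hmN : m.toNat < data.length := by omega
    have heqk : data[m.toNat] = k :=
      (eq_iff_cnt data k hs m.toNat hmN).mpr (by omega)
    rw [get_last_scan]
    by_cases hc : m + 1 < (data.length : Int) ∧
        PySem.List.pyGet? data (m + 1) = PySem.List.pyGet? data m
    · rw [if_pos hc]
      have hm1N : (m + 1).toNat < data.length := by omega
      have e1 := PySem.List.pyGet?_eq_some_getElem (xs := data) (i := m + 1)
        (by omega) (by exact_mod_cast hc.1)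
      have e2 := PySem.List.pyGet?_eq_some_getElem (xs := data) (i := m)
        hm0 (by exact_mod_cast hmn)
      have hval : data[(m + 1).toNat] = k := by
        have h3 := e1.symm.trans (hc.2.trans e2)
        rw [Option.some.injEq] at h3
        rw [h3, heqk]
      have hlt : (m + 1).toNat < cntLE data k :=
        ((le_iff_cnt data k hs _ hm1N).mp (le_of_eq hval))
      apply ih (m + 1) (by omega) (by omega) (by omega)
    · rw [if_neg hc]
      by_contra hne
      have hm1 : m + 1 < (cntLE data k : Int) := by omega
      have hm1N : (m + 1).toNat < data.length := by omega
      have hval : data[(m + 1).toNat] = k :=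
        (eq_iff_cnt data k hs _ hm1N).mpr (by omega)
      apply hc
      refine ⟨by omega, ?_⟩
      rw [PySem.List.pyGet?_eq_some_getElem (xs := data) (i := m + 1) (by omega)
            (by exact_mod_cast (by omega : m + 1 < (data.length : Int))),
          PySem.List.pyGet?_eq_some_getElem (xs := data) (i := m) hm0 (by exact_mod_cast hmn)]
      rw [hval, heqk]

theorem loopA_eq (data : List Int) (k : Int) (hs : List.Pairwise (· ≤ ·) data) :
    ∀ N : Nat, ∀ l r : Int, (r + 1 - l).toNat ≤ N →
      0 ≤ l → r ≤ (data.length : Int) - 1 →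
      l ≤ (cntLT data k : Int) → (cntLE data k : Int) - 1 ≤ r →
      get_last_loop data k l r =
        (if cntLT data k < cntLE data k then (cntLE data k : Int) - 1 else -1) := by
  intro N
  induction N with
  | zero =>
    intro l r hN h0 hr hl hr2
    rw [get_last_loop]
    rw [dif_neg (by omega)]
    have : ¬ cntLT data k < cntLE data k := by
      have := cntLT_le_cntLE data k
      omega
    rw [if_neg this]
  | succ N ih =>
    intro l r hN h0 hr hl hr2
    have hLE : (cntLE data k : Int) ≤ (data.length : Int) := by
      exact_mod_cast cntLE_le_length data k
    have hLTLE : cntLT data k ≤ cntLE data k := cntLT_le_cntLE data k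
    rw [get_last_loop]
    by_cases hlr : l ≤ r
    · rw [dif_pos hlr]
      have hfd : PySem.Int.floordiv (r - l) 2 = (r - l) / 2 :=
        PySem.Int.floordiv_eq_ediv_of_pos (by omega)
      set m : Int := l + PySem.Int.floordiv (r - l) 2 with hm
      have hml : l ≤ m ∧ m ≤ r := by rw [hm, hfd]; omega
      have hm0 : 0 ≤ m := by omega
      have hmn : m < (data.length : Int) := by omega
      have hmN : m.toNat < data.length := by omega
      have hget := pyGet_in_range data m hm0 hmn
      simp only [hget]
      by_cases hb1 : k < data[m.toNat]
      · rw [if_pos hb1]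
        have hge : ¬ data[m.toNat] ≤ k := by omega
        have : ¬ (m.toNat < cntLE data k) := fun hx =>
          hge ((le_iff_cnt data k hs _ hmN).mpr hx)
        apply ih l (m - 1) (by omega) h0 (by omega) hl (by omega)
      · rw [if_neg hb1]
        by_cases hb2 : data[m.toNat] < k
        · rw [if_pos hb2]
          have : m.toNat < cntLT data k := (lt_iff_cnt data k hs _ hmN).mp hb2
          apply ih (m + 1) r (by omega) (by omega) hr (by omega) hr2
        · rw [if_neg hb2]
          have heq : data[m.toNat] = k := by omega
          have hbounds := (eq_iff_cnt data k hs _ hmN).mp heq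
          rw [if_pos (by omega)]
          exact scan_eq data k hs ((cntLE data k : Int) - m).toNat m (le_refl _)
            (by omega) (by omega)
    · rw [dif_neg hlr]
      have : ¬ cntLT data k < cntLE data k := by omega
      rw [if_neg this]

theorem loopB_eq (data : List Int) (k : Int) (hs : List.Pairwise (· ≤ ·) data) :
    ∀ N : Nat, ∀ lo hi ans : Int, (hi + 1 - lo).toNat ≤ N →
      0 ≤ lo → hi ≤ (data.length : Int) - 1 →
      lo ≤ (cntLE data k : Int) → (cntLE data k : Int) - 1 ≤ hi →
      ans = (if (cntLT data k : Int) < lo ∧ cntLT data k < cntLE data k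
             then lo - 1 else -1) →
      get_last_alt_loop data k lo hi ans =
        (if cntLT data k < cntLE data k then (cntLE data k : Int) - 1 else -1) := by
  intro N
  induction N with
  | zero =>
    intro lo hi ans hN h0 hhi hlo hhi2 hans
    rw [get_last_alt_loop, dif_neg (by omega)]
    have hLTLE : cntLT data k ≤ cntLE data k := cntLT_le_cntLE data k
    have hle : lo = (cntLE data k : Int) := by omega
    rw [hans]
    by_cases hp : cntLT data k < cntLE data k
    · rw [if_pos (by omega), if_pos hp]; omega
    · rw [if_neg (by omega), if_neg hp]
  | succ N ih =>
    intro lo hi ans hN h0 hhi hlo hhi2 hans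
    have hLE : (cntLE data k : Int) ≤ (data.length : Int) := by
      exact_mod_cast cntLE_le_length data k
    have hLTLE : cntLT data k ≤ cntLE data k := cntLT_le_cntLE data k
    rw [get_last_alt_loop]
    by_cases hlr : lo ≤ hi
    · rw [dif_pos hlr]
      have hmb := PySem.Int.floordiv_two_mid_bounds (lo := lo) (hi := hi) hlr
      set m : Int := PySem.Int.floordiv (lo + hi) 2 with hm
      have hm0 : 0 ≤ m := by omega
      have hmn : m < (data.length : Int) := by omega
      have hmN : m.toNat < data.length := by omega
      have hget := pyGet_in_range data m hm0 hmn
      simp only [hget]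
      by_cases hb1 : data[m.toNat] ≤ k
      · rw [if_pos hb1]
        have hmlt : m.toNat < cntLE data k := (le_iff_cnt data k hs _ hmN).mp hb1
        by_cases hb2 : data[m.toNat] = k
        · rw [if_pos hb2]
          have hbounds := (eq_iff_cnt data k hs _ hmN).mp hb2
          apply ih (m + 1) hi m (by omega) (by omega) hhi (by omega) hhi2
          rw [if_pos (by constructor <;> omega)]
          omega
        · rw [if_neg hb2]
          have hblt : data[m.toNat] < k := lt_of_le_of_ne hb1 hb2
          have hmlt' : m.toNat < cntLT data k := (lt_iff_cnt data k hs _ hmN).mp hblt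
          apply ih (m + 1) hi ans (by omega) (by omega) hhi (by omega) hhi2
          have hansm : ans = -1 := by
            rw [hans, if_neg]; intro ⟨ha, _⟩; omega
          rw [hansm, if_neg]
          intro ⟨ha, _⟩; omega
      · rw [if_neg hb1]
        have hge : ¬ (m.toNat < cntLE data k) := fun hx =>
          hb1 ((le_iff_cnt data k hs _ hmN).mpr hx)
        exact ih lo (m - 1) ans (by omega) h0 (by omega) hlo (by omega) hans
    · rw [dif_neg hlr]
      have hle : lo = (cntLE data k : Int) := by omega
      rw [hans]
      by_cases hp : cntLT data k < cntLE data k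
      · rw [if_pos (by omega), if_pos hp]; omega
      · rw [if_neg (by omega), if_neg hp]

theorem loopA_notmem (data : List Int) (k : Int) (hk : k ∉ data) :
    ∀ N : Nat, ∀ l r : Int, (r + 1 - l).toNat ≤ N →
      0 ≤ l → r ≤ (data.length : Int) - 1 →
      get_last_loop data k l r = -1 := by
  intro N
  induction N with
  | zero =>
    intro l r hN h0 hr
    rw [get_last_loop, dif_neg (by omega)]
  | succ N ih =>
    intro l r hN h0 hr
    rw [get_last_loop]
    by_cases hlr : l ≤ r
    · rw [dif_pos hlr]
      have hfd : PySem.Int.floordiv (r - l) 2 = (r - l) / 2 :=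
        PySem.Int.floordiv_eq_ediv_of_pos (by omega)
      set m : Int := l + PySem.Int.floordiv (r - l) 2 with hm
      have hml : l ≤ m ∧ m ≤ r := by rw [hm, hfd]; omega
      have hm0 : 0 ≤ m := by omega
      have hmn : m < (data.length : Int) := by omega
      have hget := pyGet_in_range data m hm0 hmn
      simp only [hget]
      have hne : data[m.toNat]'(by omega) ≠ k := by
        intro he; exact hk (he ▸ List.getElem_mem _)
      by_cases hb1 : k < data[m.toNat]'(by omega)
      · rw [if_pos hb1]
        exact ih l (m - 1) (by omega) h0 (by omega)
      · rw [if_neg hb1, if_pos (by omega)]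
        exact ih (m + 1) r (by omega) (by omega) hr
    · rw [dif_neg hlr]

theorem loopB_notmem (data : List Int) (k : Int) (hk : k ∉ data) :
    ∀ N : Nat, ∀ lo hi : Int, (hi + 1 - lo).toNat ≤ N →
      0 ≤ lo → hi ≤ (data.length : Int) - 1 →
      get_last_alt_loop data k lo hi (-1) = -1 := by
  intro N
  induction N with
  | zero =>
    intro lo hi hN h0 hhi
    rw [get_last_alt_loop, dif_neg (by omega)]
  | succ N ih =>
    intro lo hi hN h0 hhi
    rw [get_last_alt_loop]
    by_cases hlr : lo ≤ hi
    · rw [dif_pos hlr]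
      have hmb := PySem.Int.floordiv_two_mid_bounds (lo := lo) (hi := hi) hlr
      set m : Int := PySem.Int.floordiv (lo + hi) 2 with hm
      have hm0 : 0 ≤ m := by omega
      have hmn : m < (data.length : Int) := by omega
      have hget := pyGet_in_range data m hm0 hmn
      simp only [hget]
      have hne : data[m.toNat]'(by omega) ≠ k := by
        intro he; exact hk (he ▸ List.getElem_mem _)
      by_cases hb1 : data[m.toNat]'(by omega) ≤ k
      · rw [if_pos hb1, if_neg hne]
        exact ih (m + 1) hi (by omega) (by omega) hhi
      · rw [if_neg hb1]
        exact ih lo (m - 1) (by omega) h0 (by omega)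
    · rw [dif_neg hlr]

-- ===== VERDICT (by name: the statement is the Claim_ definition above) =====
theorem get_last_spec : Claim_equal_get_last := by
  intro data k _ hpre
  unfold Spec_get_last get_last get_last_alt
  rcases hpre with hpre | hk
  case inr =>
    rw [loopA_notmem data k hk ((data.length : Int) - 1 + 1 - 0).toNat 0 _
          (le_refl _) (le_refl _) (le_refl _),
        loopB_notmem data k hk ((data.length : Int) - 1 + 1 - 0).toNat 0 _
          (le_refl _) (le_refl _) (le_refl _)]
  case inl =>
  have hLE := cntLE_le_length data k
  have hLTLE := cntLT_le_cntLE data k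
  rw [loopA_eq data k hpre ((data.length : Int) - 1 + 1 - 0).toNat 0 ((data.length : Int) - 1)
        (le_refl _) (le_refl _) (le_refl _) (by omega) (by omega)]
  rw [loopB_eq data k hpre ((data.length : Int) - 1 + 1 - 0).toNat 0 ((data.length : Int) - 1) (-1)
        (le_refl _) (le_refl _) (le_refl _) (by omega) (by omega)
        (by simp)]
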